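-- pv_equiv track=rewrite | github.com/shatianming5/open-problem-atlas | verifiers/checkers/math/ramsey_r55_checker.py | _build_paley_graph
-- ===== SOURCE A (Python) =====
-- def _build_paley_graph(q: int) -> list[set[int]]:
--     """Build the Paley graph on q vertices (q prime, q ≡ 1 mod 4).
--
--     Edges connect i,j when (i-j) is a quadratic residue mod q.
--     """
--     qr = set()
--     for i in range(1, q):
--         qr.add((i * i) % q)
--
--     adj = [set() for _ in range(q)]
--     for i in range(q):
--         for j in range(i + 1, q):
--             if (j - i) % q in qr:
--                 adj[i].add(j)
--                 adj[j].add(i)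
--     return adj
-- ===== SOURCE B (Python) =====
-- def _build_paley_graph(q: int) -> list[set[int]]:
--     """Build the Paley graph on q vertices (q prime, q ≡ 1 mod 4).
--
--     Edges connect i,j when (i-j) is a quadratic residue mod q.
--     """
--     # 0 is never the difference of two distinct vertices, so drop it.
--     qr = sorted({(i * i) % q for i in range(1, q)} - {0})
--     adj = []
--     for i in range(q):
--         # generate row i directly from the sorted residue list, in ascending
--         # vertex order: neighbours below i, then neighbours above i
--         adj.append(set([i - d for d in reversed(qr) if d <= i]
--                        + [i + d for d in qr if i + d < q]))
--     return adj
-- ===== Notes on version B (the rewrite author's own statement) =====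
-- stated objective: alternative
-- what changed: B replaces A's nested all-pairs loop with a membership test per pair by generation from a sorted residue list: row i is produced directly as the offsets i-d (descending residues) and i+d (ascending residues) that stay in range, so the inner loop runs over residues and contains no membership test and no adjacency mutation of other rows.
import Mathlib
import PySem

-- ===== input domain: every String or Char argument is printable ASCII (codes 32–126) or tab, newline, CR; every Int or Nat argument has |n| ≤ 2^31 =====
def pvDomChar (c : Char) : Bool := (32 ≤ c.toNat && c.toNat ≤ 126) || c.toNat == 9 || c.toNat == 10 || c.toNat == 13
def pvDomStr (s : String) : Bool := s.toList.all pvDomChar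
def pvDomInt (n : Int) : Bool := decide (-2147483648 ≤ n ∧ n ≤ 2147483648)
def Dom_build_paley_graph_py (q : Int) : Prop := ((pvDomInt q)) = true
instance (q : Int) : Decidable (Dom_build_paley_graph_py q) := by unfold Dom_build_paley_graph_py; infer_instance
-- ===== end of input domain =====

-- B builds each adjacency row by generation from the sorted residue list (offsets i-d, then
-- i+d), instead of A's all-pairs double loop testing each difference for membership and
-- mutating two rows per edge (objective: alternative).

-- ===== PORT A =====
-- qr = set(); for i in range(1, q): qr.add((i*i) % q)
def pvQr (q : Int) : PySem.Set Int :=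
  (PySem.List.pyRange 1 q 1).foldl (fun s i => PySem.Set.add s (PySem.Int.mod (i * i) q)) PySem.Set.empty

-- body of the inner loop: if (j - i) % q in qr: adj[i].add(j); adj[j].add(i)
def pvInner (q : Int) (qr : PySem.Set Int) (i : Int) (adj : List (PySem.Set Int)) (j : Int) :
    List (PySem.Set Int) :=
  if PySem.Set.contains qr (PySem.Int.mod (j - i) q) then
    let adj1 := PySem.List.pySetD adj i (PySem.Set.add (PySem.List.pyGetD adj i PySem.Set.empty) j)
    PySem.List.pySetD adj1 j (PySem.Set.add (PySem.List.pyGetD adj1 j PySem.Set.empty) i)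
  else adj

-- body of the outer loop: for j in range(i+1, q): …
def pvOuter (q : Int) (qr : PySem.Set Int) (adj : List (PySem.Set Int)) (i : Int) :
    List (PySem.Set Int) :=
  (PySem.List.pyRange (i + 1) q 1).foldl (pvInner q qr i) adj

def build_paley_graph_py (q : Int) : List (List Int) :=
  (PySem.List.pyRange 0 q 1).foldl (pvOuter q (pvQr q))
    ((PySem.List.pyRange 0 q 1).map (fun _ => PySem.Set.empty))

-- ===== PORT B =====
-- qr = sorted({(i*i) % q for i in range(1, q)} - {0})
def pvQrB (q : Int) : List Int :=
  PySem.List.sorted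
    (PySem.Set.diff
      (PySem.Set.ofList ((PySem.List.pyRange 1 q 1).map (fun i => PySem.Int.mod (i * i) q)))
      (PySem.Set.ofList [(0 : Int)]))
    (fun d => d)

-- set([i - d for d in reversed(qr) if d <= i] + [i + d for d in qr if i + d < q])
def pvRowB (q : Int) (qr : List Int) (i : Int) : List Int :=
  PySem.Set.ofList
    ((qr.reverse.filter (fun d => decide (d ≤ i))).map (fun d => i - d)
      ++ (qr.filter (fun d => decide (i + d < q))).map (fun d => i + d))

-- adj = []; for i in range(q): adj.append(row)
def build_paley_graph_py_alt (q : Int) : List (List Int) :=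
  (PySem.List.pyRange 0 q 1).foldl (fun adj i => adj ++ [pvRowB q (pvQrB q) i]) []

-- ===== PRECONDITION & SPEC =====
def Spec_build_paley_graph_py (q : Int) (out : List (List Int)) : Prop := out = build_paley_graph_py_alt q
instance (q : Int) (out : List (List Int)) : Decidable (Spec_build_paley_graph_py q out) := by unfold Spec_build_paley_graph_py; infer_instance

-- ===== CLAIM (what is proved, stated in full; the proofs are below) =====
def Claim_equal_build_paley_graph_py : Prop := ∀ (q : Int), Dom_build_paley_graph_py q → Spec_build_paley_graph_py q (build_paley_graph_py q)


-- ===== LEMMAS AND PROOFS =====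

-- Invariant row: after A has processed all unordered pairs {x,y} with min x y < k,
-- plus (at outer iteration k) the pairs {k, j'} with j' < m, row i holds exactly the
-- neighbours j (in ascending order) whose pair has already been processed.
def pvPred (qr : List Int) (k m i j : Int) : Bool :=
  decide (j ≠ i ∧ |i - j| ∈ qr ∧ (min i j < k ∨ (min i j = k ∧ max i j < m)))

def pvRow (qr : List Int) (q k m i : Int) : List Int :=
  (PySem.List.pyRange 0 q 1).filter (pvPred qr k m i)

lemma pv_abs_sub (i j : Int) : |i - j| = max i j - min i j := by
  rcases le_total i j with h | h
  · rw [abs_of_nonpos (by omega)]; omega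
  · rw [abs_of_nonneg (by omega)]; omega

-- setting index i of a map over range 0..q rewrites the mapped function at i
lemma pv_setD_map_range (f : Int → List Int) (q i : Int) (v : List Int) (h0 : 0 ≤ i) :
    PySem.List.pySetD ((PySem.List.pyRange 0 q 1).map f) i v
      = (PySem.List.pyRange 0 q 1).map (fun x => if x = i then v else f x) := by
  rw [PySem.List.pySetD_of_nonneg _ _ h0]
  apply List.ext_getElem
  · simp
  · intro n hn1 hn2
    simp only [List.getElem_set, List.getElem_map, PySem.List.getElem_pyRange_one]
    by_cases h : n = i.toNat
    · simp [h, Int.toNat_of_nonneg h0]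
    · rw [if_neg (by omega), if_neg (by omega)]

-- the membership of A's residue set, as a list
lemma pv_qr_eq (q : Int) :
    pvQr q = PySem.Set.ofList ((PySem.List.pyRange 1 q 1).map (fun i => PySem.Int.mod (i * i) q)) := by
  rw [PySem.Set.ofList_eq_foldl, List.foldl_map]; rfl

lemma pv_mod_small (a q : Int) (h0 : 0 ≤ a) (h1 : a < q) : PySem.Int.mod a q = a := by
  rw [PySem.Int.mod_eq_emod_of_pos (by omega)]; exact Int.emod_eq_of_lt h0 h1

-- row i is unchanged by processing pair {k,m} when i is neither k nor m
lemma pv_row_other (qr : List Int) (q k m i : Int) (hik : i ≠ k) (him : i ≠ m) :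
    pvRow qr q k m i = pvRow qr q k (m + 1) i := by
  apply List.filter_congr
  intro j _
  rw [pvPred, pvPred, decide_eq_decide]
  constructor <;> rintro ⟨h1, h2, h3⟩ <;> exact ⟨h1, h2, by omega⟩

-- rows are unchanged when {k,m} is not an edge
lemma pv_row_noedge (qr : List Int) (q k m i : Int) (hqr : (m - k) ∉ qr) :
    pvRow qr q k m i = pvRow qr q k (m + 1) i := by
  apply List.filter_congr
  intro j _
  rw [pvPred, pvPred, decide_eq_decide]
  constructor <;> rintro ⟨h1, h2, h3⟩ <;> refine ⟨h1, h2, ?_⟩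
  · omega
  · rcases h3 with h | ⟨h4, h5⟩
    · left; exact h
    · by_cases h6 : max i j < m
      · right; exact ⟨h4, h6⟩
      · exfalso
        have habs : |i - j| = m - k := by rw [pv_abs_sub]; omega
        rw [habs] at h2; exact hqr h2

-- at outer iteration k, nothing has been added yet when the inner loop starts
lemma pv_row_start (qr : List Int) (q k i : Int) :
    pvRow qr q k k i = pvRow qr q k (k + 1) i := by
  apply List.filter_congr
  intro j _
  rw [pvPred, pvPred, decide_eq_decide]
  constructor <;> rintro ⟨h1, h2, h3⟩ <;> exact ⟨h1, h2, by omega⟩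

-- after the inner loop of iteration k has run to the end, the state is that of iteration k+1
lemma pv_row_advance (qr : List Int) (q k i : Int) (hiq : i < q) :
    pvRow qr q k q i = pvRow qr q (k + 1) (k + 1) i := by
  apply List.filter_congr
  intro j hj
  have hjb := PySem.List.mem_pyRange_one.mp hj
  rw [pvPred, pvPred, decide_eq_decide]
  constructor <;> rintro ⟨h1, h2, h3⟩ <;> exact ⟨h1, h2, by omega⟩

-- adding neighbour m to row k when {k,m} is an edge
lemma pv_row_k (qr : List Int) (q k m : Int) (hk : 0 ≤ k) (hkm : k < m) (hmq : m < q)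
    (hqr : (m - k) ∈ qr) :
    PySem.Set.add (pvRow qr q k m k) m = pvRow qr q k (m + 1) k := by
  have hnm : m ∉ pvRow qr q k m k := by
    intro hmem
    unfold pvRow at hmem
    have hp := List.of_mem_filter hmem
    rw [pvPred, decide_eq_true_eq] at hp
    obtain ⟨h1, h2, h3⟩ := hp
    omega
  rw [PySem.Set.add_of_not_mem hnm]
  unfold pvRow
  rw [PySem.List.pyRange_one_append 0 (m + 1) q (by omega) (by omega),
      PySem.List.pyRange_one_succ_right (by omega : (0:Int) ≤ m)]
  simp only [List.filter_append]
  have e1 : (PySem.List.pyRange 0 m 1).filter (pvPred qr k m k)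
      = (PySem.List.pyRange 0 m 1).filter (pvPred qr k (m + 1) k) := by
    apply List.filter_congr
    intro j hj
    have hjb := PySem.List.mem_pyRange_one.mp hj
    rw [pvPred, pvPred, decide_eq_decide]
    constructor <;> rintro ⟨h1, h2, h3⟩ <;> exact ⟨h1, h2, by omega⟩
  have e2 : List.filter (pvPred qr k m k) [m] = [] := by
    rw [List.filter_eq_nil_iff]
    intro j hj
    simp only [List.mem_singleton] at hj
    subst hj
    simp only [pvPred, decide_eq_true_eq]
    rintro ⟨h1, h2, h3⟩; omega
  have e3 : List.filter (pvPred qr k (m + 1) k) [m] = [m] := by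
    have : pvPred qr k (m + 1) k m = true := by
      rw [pvPred, decide_eq_true_eq]
      refine ⟨by omega, ?_, by omega⟩
      have habs : |k - m| = m - k := by rw [pv_abs_sub]; omega
      rw [habs]; exact hqr
    simp [List.filter, this]
  have e4 : (PySem.List.pyRange (m + 1) q 1).filter (pvPred qr k m k) = [] := by
    rw [List.filter_eq_nil_iff]
    intro j hj
    have hjb := PySem.List.mem_pyRange_one.mp hj
    simp only [pvPred, decide_eq_true_eq]
    rintro ⟨h1, h2, h3⟩; omega
  have e5 : (PySem.List.pyRange (m + 1) q 1).filter (pvPred qr k (m + 1) k) = [] := by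
    rw [List.filter_eq_nil_iff]
    intro j hj
    have hjb := PySem.List.mem_pyRange_one.mp hj
    simp only [pvPred, decide_eq_true_eq]
    rintro ⟨h1, h2, h3⟩; omega
  rw [e1, e2, e3, e4, e5]
  simp

-- adding neighbour k to row m when {k,m} is an edge
lemma pv_row_m (qr : List Int) (q k m : Int) (hk : 0 ≤ k) (hkm : k < m) (hmq : m < q)
    (hqr : (m - k) ∈ qr) :
    PySem.Set.add (pvRow qr q k m m) k = pvRow qr q k (m + 1) m := by
  have hnk : k ∉ pvRow qr q k m m := by
    intro hmem
    unfold pvRow at hmem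
    have hp := List.of_mem_filter hmem
    rw [pvPred, decide_eq_true_eq] at hp
    obtain ⟨h1, h2, h3⟩ := hp
    omega
  rw [PySem.Set.add_of_not_mem hnk]
  unfold pvRow
  rw [PySem.List.pyRange_one_append 0 (k + 1) q (by omega) (by omega),
      PySem.List.pyRange_one_succ_right (by omega : (0:Int) ≤ k)]
  simp only [List.filter_append]
  have e1 : (PySem.List.pyRange 0 k 1).filter (pvPred qr k m m)
      = (PySem.List.pyRange 0 k 1).filter (pvPred qr k (m + 1) m) := by
    apply List.filter_congr
    intro j hj
    have hjb := PySem.List.mem_pyRange_one.mp hj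
    rw [pvPred, pvPred, decide_eq_decide]
    constructor <;> rintro ⟨h1, h2, h3⟩ <;> exact ⟨h1, h2, by omega⟩
  have e2 : List.filter (pvPred qr k m m) [k] = [] := by
    rw [List.filter_eq_nil_iff]
    intro j hj
    simp only [List.mem_singleton] at hj
    subst hj
    simp only [pvPred, decide_eq_true_eq]
    rintro ⟨h1, h2, h3⟩; omega
  have e3 : List.filter (pvPred qr k (m + 1) m) [k] = [k] := by
    have : pvPred qr k (m + 1) m k = true := by
      rw [pvPred, decide_eq_true_eq]
      refine ⟨by omega, ?_, by omega⟩
      have habs : |m - k| = m - k := by rw [pv_abs_sub]; omega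
      rw [habs]; exact hqr
    simp [List.filter, this]
  have e4 : (PySem.List.pyRange (k + 1) q 1).filter (pvPred qr k m m) = [] := by
    rw [List.filter_eq_nil_iff]
    intro j hj
    have hjb := PySem.List.mem_pyRange_one.mp hj
    simp only [pvPred, decide_eq_true_eq]
    rintro ⟨h1, h2, h3⟩; omega
  have e5 : (PySem.List.pyRange (k + 1) q 1).filter (pvPred qr k (m + 1) m) = [] := by
    rw [List.filter_eq_nil_iff]
    intro j hj
    have hjb := PySem.List.mem_pyRange_one.mp hj
    simp only [pvPred, decide_eq_true_eq]
    rintro ⟨h1, h2, h3⟩; omega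
  rw [e1, e2, e3, e4, e5]
  simp

-- one inner-loop step preserves the invariant
lemma pv_inner_step (qr : List Int) (q k m : Int) (hk : 0 ≤ k) (hkm : k < m) (hmq : m < q) :
    pvInner q qr k ((PySem.List.pyRange 0 q 1).map (pvRow qr q k m)) m
      = (PySem.List.pyRange 0 q 1).map (pvRow qr q k (m + 1)) := by
  simp only [pvInner]
  rw [pv_mod_small (m - k) q (by omega) (by omega)]
  by_cases hedge : (m - k) ∈ qr
  · rw [if_pos ((PySem.Set.contains_iff qr _).mpr hedge)]
    rw [PySem.List.pyGetD_map_pyRange_of_nonneg _ q k _ hk (by omega)]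
    rw [pv_setD_map_range _ q k _ hk]
    rw [PySem.List.pyGetD_map_pyRange_of_nonneg _ q m _ (by omega) hmq]
    rw [if_neg (by omega)]
    rw [pv_setD_map_range _ q m _ (by omega)]
    apply List.map_congr_left
    intro x hx
    have hxb := PySem.List.mem_pyRange_one.mp hx
    by_cases hxm : x = m
    · subst hxm
      rw [if_pos rfl]
      exact pv_row_m qr q k x hk hkm hmq hedge
    · rw [if_neg hxm]
      by_cases hxk : x = k
      · subst hxk
        rw [if_pos rfl]
        exact pv_row_k qr q x m hk hkm hmq hedge
      · rw [if_neg hxk]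
        exact pv_row_other qr q k m x hxk hxm
  · rw [if_neg (by simpa [PySem.Set.contains_iff] using hedge)]
    apply List.map_congr_left
    intro x hx
    exact pv_row_noedge qr q k m x hedge

-- the whole inner loop
lemma pv_inner_fold (qr : List Int) (q k : Int) (hk : 0 ≤ k) (d : Nat)
    (hd : k + 1 + d ≤ q) :
    (PySem.List.pyRange (k + 1) (k + 1 + d) 1).foldl (pvInner q qr k)
        ((PySem.List.pyRange 0 q 1).map (pvRow qr q k (k + 1)))
      = (PySem.List.pyRange 0 q 1).map (pvRow qr q k (k + 1 + d)) := by
  induction d with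
  | zero =>
    rw [show k + 1 + ((0 : Nat) : Int) = k + 1 by push_cast; ring]
    rw [PySem.List.pyRange_one_eq_nil le_rfl]
    rfl
  | succ d ih =>
    rw [show k + 1 + ((d + 1 : Nat) : Int) = (k + 1 + (d : Int)) + 1 by push_cast; ring]
    rw [PySem.List.pyRange_one_succ_right (by omega : k + 1 ≤ k + 1 + (d : Int))]
    rw [List.foldl_append, ih (by push_cast at hd ⊢; omega)]
    simp only [List.foldl_cons, List.foldl_nil]
    exact pv_inner_step qr q k (k + 1 + (d : Int)) hk (by omega) (by push_cast at hd; omega)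

-- the outer loop invariant
lemma pv_outer_fold (qr : List Int) (q : Int) :
    ∀ (c : Nat), (c : Int) ≤ q →
    (PySem.List.pyRange 0 c 1).foldl (pvOuter q qr)
        ((PySem.List.pyRange 0 q 1).map (fun _ => PySem.Set.empty))
      = (PySem.List.pyRange 0 q 1).map (pvRow qr q c c) := by
  intro c
  induction c with
  | zero =>
    intro _
    rw [show ((0 : Nat) : Int) = 0 by rfl, PySem.List.pyRange_one_eq_nil le_rfl]
    simp only [List.foldl_nil]
    apply List.map_congr_left
    intro x hx
    have hxb := PySem.List.mem_pyRange_one.mp hx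
    symm
    show _ = ([] : List Int)
    rw [pvRow, List.filter_eq_nil_iff]
    intro j hj
    have hjb := PySem.List.mem_pyRange_one.mp hj
    simp only [pvPred, decide_eq_true_eq]
    rintro ⟨h1, h2, h3⟩; omega
  | succ c ih =>
    intro hc
    rw [show ((c + 1 : Nat) : Int) = (c : Int) + 1 by push_cast; ring]
    rw [PySem.List.pyRange_one_succ_right (by positivity)]
    rw [List.foldl_append, ih (by push_cast at hc; omega)]
    simp only [List.foldl_cons, List.foldl_nil]
    unfold pvOuter
    rw [show (PySem.List.pyRange 0 q 1).map (pvRow qr q c c)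
        = (PySem.List.pyRange 0 q 1).map (pvRow qr q c ((c : Int) + 1)) from
      List.map_congr_left (fun x _ => pv_row_start qr q c x)]
    have hcq : (c : Int) + 1 ≤ q := by push_cast at hc; omega
    have hdq : q = (c : Int) + 1 + ((q - ((c : Int) + 1)).toNat : Int) := by omega
    rw [show (PySem.List.pyRange ((c:Int) + 1) q 1) = PySem.List.pyRange ((c:Int) + 1) ((c:Int) + 1 + ((q - ((c : Int) + 1)).toNat : Int)) 1 by rw [← hdq]]
    rw [pv_inner_fold qr q c (by positivity) _ (by omega)]
    rw [← hdq]
    apply List.map_congr_left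
    intro x hx
    have hxb := PySem.List.mem_pyRange_one.mp hx
    exact pv_row_advance qr q c x hxb.2

-- B's append loop is a map
lemma pv_foldl_append {α β : Type} (f : α → β) (l : List α) (acc : List β) :
    l.foldl (fun a x => a ++ [f x]) acc = acc ++ l.map f := by
  induction l generalizing acc with
  | nil => simp
  | cons x xs ih => simp [ih]

-- B's residue list: membership
lemma pv_qrB_mem (q d : Int) : d ∈ pvQrB q ↔ d ∈ pvQr q ∧ d ≠ 0 := by
  rw [pvQrB, PySem.List.mem_sorted, PySem.Set.mem_diff, pv_qr_eq, PySem.Set.mem_ofList,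
      PySem.Set.mem_ofList]
  simp

-- B's residue list: bounds (each residue lies in 1..q-1)
lemma pv_qrB_bounds (q d : Int) (hd : d ∈ pvQrB q) : 1 ≤ d ∧ d < q := by
  obtain ⟨hmem, hne⟩ := (pv_qrB_mem q d).mp hd
  rw [pv_qr_eq, PySem.Set.mem_ofList, List.mem_map] at hmem
  obtain ⟨x, hx, rfl⟩ := hmem
  have hxb := PySem.List.mem_pyRange_one.mp hx
  have h1 := PySem.Int.mod_nonneg (x * x) (b := q) (by omega)
  have h2 := PySem.Int.mod_lt (x * x) (b := q) (by omega)
  omega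

-- B's residue list: strictly increasing
lemma pv_qrB_sorted (q : Int) : (pvQrB q).Pairwise (· < ·) := by
  have hle : (pvQrB q).Pairwise (· ≤ ·) :=
    PySem.List.sorted_pairwise _ (fun d => d)
  have hnd : (pvQrB q).Nodup := by
    rw [pvQrB]
    exact (PySem.List.sorted_perm _ _ _).nodup_iff.mpr
      (PySem.Set.nodup_diff _ _ (PySem.Set.nodup_ofList _))
  exact (hle.and hnd).imp (fun h => lt_of_le_of_ne h.1 h.2)

-- the generated row equals A's final row (both are the strictly increasing neighbour list)
lemma pv_rowB_eq (q i : Int) (h0 : 0 ≤ i) (hiq : i < q) :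
    pvRow (pvQr q) q q q i = pvRowB q (pvQrB q) i := by
  set L := (((pvQrB q).reverse.filter (fun d => decide (d ≤ i))).map (fun d => i - d)
      ++ ((pvQrB q).filter (fun d => decide (i + d < q))).map (fun d => i + d)) with hL
  have hmemL : ∀ j, j ∈ L ↔ (0 ≤ j ∧ j < q ∧ j ≠ i ∧ |i - j| ∈ pvQr q) := by
    intro j
    rw [hL, List.mem_append, List.mem_map, List.mem_map]
    constructor
    · rintro (⟨d, hd, rfl⟩ | ⟨d, hd, rfl⟩)
      · have hd1 := List.of_mem_filter hd
        have hd2 := (pv_qrB_bounds q d) (List.mem_reverse.mp (List.mem_of_mem_filter hd))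
        have hd3 := (pv_qrB_mem q d).mp (List.mem_reverse.mp (List.mem_of_mem_filter hd))
        simp only [decide_eq_true_eq] at hd1
        refine ⟨by omega, by omega, by omega, ?_⟩
        have : |i - (i - d)| = d := by rw [abs_of_nonneg (by omega)]; omega
        rw [this]; exact hd3.1
      · have hd1 := List.of_mem_filter hd
        have hd2 := pv_qrB_bounds q d (List.mem_of_mem_filter hd)
        have hd3 := (pv_qrB_mem q d).mp (List.mem_of_mem_filter hd)
        simp only [decide_eq_true_eq] at hd1
        refine ⟨by omega, by omega, by omega, ?_⟩
        have : |i - (i + d)| = d := by rw [abs_of_nonpos (by omega)]; omega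
        rw [this]; exact hd3.1
    · rintro ⟨hj0, hjq, hji, hjqr⟩
      by_cases hlt : j < i
      · left
        refine ⟨i - j, ?_, by omega⟩
        apply List.mem_filter.mpr
        have habs : |i - j| = i - j := by rw [pv_abs_sub]; omega
        have hm : (i - j) ∈ pvQrB q := (pv_qrB_mem q (i - j)).mpr ⟨habs ▸ hjqr, by omega⟩
        exact ⟨List.mem_reverse.mpr hm, by simp only [decide_eq_true_eq]; omega⟩
      · right
        refine ⟨j - i, ?_, by omega⟩
        apply List.mem_filter.mpr
        have habs : |i - j| = j - i := by rw [pv_abs_sub]; omega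
        have hm : (j - i) ∈ pvQrB q := (pv_qrB_mem q (j - i)).mpr ⟨habs ▸ hjqr, by omega⟩
        exact ⟨hm, by simp only [decide_eq_true_eq]; omega⟩
  have hsortL : L.Pairwise (· < ·) := by
    rw [hL]
    apply List.pairwise_append.mpr
    refine ⟨?_, ?_, ?_⟩
    · rw [List.pairwise_map]
      exact (((pv_qrB_sorted q).reverse).filter _).imp (by intro a b h; omega)
    · rw [List.pairwise_map]
      exact ((pv_qrB_sorted q).filter _).imp (by intro a b h; omega)
    · intro a ha b hb
      obtain ⟨d1, hd1, rfl⟩ := List.mem_map.mp ha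
      obtain ⟨d2, hd2, rfl⟩ := List.mem_map.mp hb
      have := pv_qrB_bounds q d1 (List.mem_reverse.mp (List.mem_of_mem_filter hd1))
      have := pv_qrB_bounds q d2 (List.mem_of_mem_filter hd2)
      omega
  have hsortR : (pvRow (pvQr q) q q q i).Pairwise (· < ·) :=
    (PySem.List.pairwise_lt_pyRange_one 0 q).filter _
  have hperm : (pvRow (pvQr q) q q q i).Perm L := by
    apply (List.perm_ext_iff_of_nodup
      (hsortR.imp (fun h => ne_of_lt h)) (hsortL.imp (fun h => ne_of_lt h))).mpr
    intro j
    rw [hmemL j, pvRow, List.mem_filter, PySem.List.mem_pyRange_one]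
    simp only [pvPred, decide_eq_true_eq]
    constructor
    · rintro ⟨⟨hj0, hjq⟩, h1, h2, _⟩
      exact ⟨hj0, hjq, h1, h2⟩
    · rintro ⟨hj0, hjq, h1, h2⟩
      exact ⟨⟨hj0, hjq⟩, h1, h2, by omega⟩
  have hself : pvRowB q (pvQrB q) i = L := by
    rw [pvRowB, ← hL]
    exact PySem.Set.ofList_eq_self_of_nodup _ (hsortL.imp (fun h => ne_of_lt h))
  rw [hself]
  exact hperm.eq_of_pairwise (fun a b _ _ h1 h2 => by omega) hsortR hsortL

-- ===== VERDICT (by name: the statement is the Claim_ definition above) =====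
theorem build_paley_graph_py_spec : Claim_equal_build_paley_graph_py := by
  intro q _
  unfold Spec_build_paley_graph_py build_paley_graph_py build_paley_graph_py_alt
  rw [pv_foldl_append]
  by_cases hq : 0 ≤ q
  · have h := pv_outer_fold (pvQr q) q q.toNat (by omega)
    rw [Int.toNat_of_nonneg hq] at h
    rw [h, List.nil_append]
    apply List.map_congr_left
    intro i hi
    have hib := PySem.List.mem_pyRange_one.mp hi
    exact pv_rowB_eq q i hib.1 hib.2
  · rw [PySem.List.pyRange_one_eq_nil (by omega)]
    rfl
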